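-- pv_equiv track=rewrite | github.com/abdoljh/questreporter | doi_utils.py | format_crossref_authors
-- ===== SOURCE A (Python) =====
-- def format_crossref_authors(authors_list):
--     """Formats Crossref author list into IEEE 'I. Surname'."""
--     if not authors_list:
--         return "Unknown Author"
--
--     formatted = []
--     for auth in authors_list:
--         family = auth.get('family', '')
--         given = auth.get('given', '')
--         if family and given:
--             # IEEE Style: Initials. Surname
--             formatted.append(f"{given[0]}. {family}")
--         else:
--             formatted.append(family if family else "Unknown")
--
--     if len(formatted) >= 3:
--         return f"{formatted[0]} et al."
--     elif len(formatted) == 2: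
--         return f"{formatted[0]} and {formatted[1]}"
--     return formatted[0]
-- ===== SOURCE B (Python) =====
-- def _ieee_author(auth):
--     family = auth.get('family', '')
--     if not family:
--         return "Unknown"
--     given = auth.get('given', '')
--     return (given[:1] + ". " if given else "") + family
--
--
-- def format_crossref_authors(authors_list):
--     """Formats Crossref author list into IEEE 'I. Surname'."""
--     match authors_list:
--         case []:
--             return "Unknown Author"
--         case [only]:
--             return _ieee_author(only)
--         case [first, second]:
--             return f"{_ieee_author(first)} and {_ieee_author(second)}"
--         case [first, *_]:
--             return f"{_ieee_author(first)} et al."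
-- ===== Notes on version B (the rewrite author's own statement) =====
-- stated objective: simpler
-- what changed: B pattern-matches directly on the list structure (empty / one / two / three-or-more) instead of folding the whole list into a formatted list and indexing it by length, and its per-author helper branches on the family name first and takes the initial by slicing given[:1] instead of indexing given[0] inside a conjunction test.
import Mathlib
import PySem

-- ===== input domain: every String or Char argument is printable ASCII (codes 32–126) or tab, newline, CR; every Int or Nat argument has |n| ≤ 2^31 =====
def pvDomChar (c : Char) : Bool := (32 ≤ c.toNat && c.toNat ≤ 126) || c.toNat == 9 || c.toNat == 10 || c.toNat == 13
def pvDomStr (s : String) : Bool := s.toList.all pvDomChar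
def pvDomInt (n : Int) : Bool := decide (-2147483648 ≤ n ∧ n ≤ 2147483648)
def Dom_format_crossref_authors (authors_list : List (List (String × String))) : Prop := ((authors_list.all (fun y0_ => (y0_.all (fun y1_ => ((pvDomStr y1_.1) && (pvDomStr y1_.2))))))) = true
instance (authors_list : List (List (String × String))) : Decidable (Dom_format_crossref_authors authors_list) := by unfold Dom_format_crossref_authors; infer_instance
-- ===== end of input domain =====

-- B replaces A's loop-then-index pipeline by direct structural pattern matching on the list shape,
-- with a per-author helper that branches on the family name first and takes initials by slicing (objective: simpler).

-- ===== PORT A =====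
def format_crossref_authors (authors_list : List (List (String × String))) : String :=
  if authors_list = [] then "Unknown Author"
  else
    let formatted : List String := authors_list.foldl (fun acc auth =>
      let family := (List.lookup "family" auth).getD ""
      let given := (List.lookup "given" auth).getD ""
      if family ≠ "" ∧ given ≠ "" then
        -- given[0]: safe here since given ≠ "" in this branch
        acc ++ [(match PySem.Str.pyGet? given 0 with
                 | some c => String.ofList [c] ++ ". " ++ family
                 | none => "")]
      else
        acc ++ [if family ≠ "" then family else "Unknown"]) []
    if formatted.length ≥ 3 then PySem.List.pyGetD formatted 0 "" ++ " et al."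
    else if formatted.length = 2 then
      PySem.List.pyGetD formatted 0 "" ++ " and " ++ PySem.List.pyGetD formatted 1 ""
    else PySem.List.pyGetD formatted 0 ""

-- ===== PORT B =====
def ieee_author (auth : List (String × String)) : String :=
  let family := (List.lookup "family" auth).getD ""
  if family = "" then "Unknown"
  else
    let given := (List.lookup "given" auth).getD ""
    (if given ≠ "" then PySem.Str.slice given none (some 1) ++ ". " else "") ++ family

def format_crossref_authors_alt (authors_list : List (List (String × String))) : String :=
  match authors_list with
  | [] => "Unknown Author"
  | [only] => ieee_author only
  | [first, second] => ieee_author first ++ " and " ++ ieee_author second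
  | first :: _ :: _ :: _ => ieee_author first ++ " et al."

-- ===== PRECONDITION & SPEC =====
def Spec_format_crossref_authors (authors_list : List (List (String × String))) (out : String) : Prop := out = format_crossref_authors_alt authors_list
instance (authors_list : List (List (String × String))) (out : String) : Decidable (Spec_format_crossref_authors authors_list out) := by unfold Spec_format_crossref_authors; infer_instance

-- ===== CLAIM (what is proved, stated in full; the proofs are below) =====
def Claim_equal_format_crossref_authors : Prop := ∀ (authors_list : List (List (String × String))), Dom_format_crossref_authors authors_list → Spec_format_crossref_authors authors_list (format_crossref_authors authors_list)

-- ===== LEMMAS AND PROOFS =====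

-- A's per-author formatting agrees with B's helper
theorem fmtA_eq_ieee (auth : List (String × String)) :
    (let family := (List.lookup "family" auth).getD ""
     let given := (List.lookup "given" auth).getD ""
     if family ≠ "" ∧ given ≠ "" then
       (match PySem.Str.pyGet? given 0 with
        | some c => String.ofList [c] ++ ". " ++ family
        | none => "")
     else
       if family ≠ "" then family else "Unknown") = ieee_author auth := by
  unfold ieee_author
  set family := (List.lookup "family" auth).getD "" with hf
  set given := (List.lookup "given" auth).getD "" with hg
  by_cases h1 : family = ""
  · simp [h1]
  · by_cases h2 : given = ""
    · simp [h1, h2]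
    · have hne : given.toList ≠ [] := fun h => h2 (by
        have := congrArg String.ofList h
        simpa using this)
      obtain ⟨c, cs, hc⟩ : ∃ c cs, given.toList = c :: cs := by
        cases hcl : given.toList with
        | nil => exact absurd hcl hne
        | cons a b => exact ⟨a, b, rfl⟩
      have hslice : PySem.Str.slice given none (some 1) = String.ofList [c] := by
        apply String.toList_injective
        simp [PySem.List.slice, hc]
      simp [h1, h2, hc, hslice]

theorem formatted_eq_map (l : List (List (String × String))) (acc : List String) :
    l.foldl (fun acc auth =>
      let family := (List.lookup "family" auth).getD ""
      let given := (List.lookup "given" auth).getD ""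
      if family ≠ "" ∧ given ≠ "" then
        acc ++ [(match PySem.Str.pyGet? given 0 with
                 | some c => String.ofList [c] ++ ". " ++ family
                 | none => "")]
      else
        acc ++ [if family ≠ "" then family else "Unknown"]) acc
    = acc ++ l.map ieee_author := by
  induction l generalizing acc with
  | nil => simp
  | cons a t ih =>
    simp only [List.foldl_cons, ih, List.map_cons]
    have := fmtA_eq_ieee a
    by_cases h : (List.lookup "family" a).getD "" ≠ "" ∧ (List.lookup "given" a).getD "" ≠ "" <;>
      simp only at this <;> simp [h, ← this]

-- ===== VERDICT (by name: the statement is the Claim_ definition above) =====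
theorem format_crossref_authors_spec : Claim_equal_format_crossref_authors := by
  intro l _
  show format_crossref_authors l = format_crossref_authors_alt l
  unfold format_crossref_authors format_crossref_authors_alt
  match l with
  | [] => rfl
  | [a] =>
    simp only [formatted_eq_map, List.nil_append, List.map_cons, List.map_nil]
    generalize ieee_author a = x
    simp [PySem.List.pyGetD, PySem.List.pyGet?, PySem.List.pyIdx?]
  | [a, b] =>
    simp only [formatted_eq_map, List.nil_append, List.map_cons, List.map_nil]
    generalize ieee_author a = x
    generalize ieee_author b = y
    simp [PySem.List.pyGetD, PySem.List.pyGet?, PySem.List.pyIdx?]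
  | a :: b :: c :: r =>
    simp only [formatted_eq_map, List.nil_append, List.map_cons]
    generalize ieee_author a = x
    simp [PySem.List.pyGetD_zero_cons]
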